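-- pv_equiv track=rewrite | github.com/sururuu/TIL | Programmers/더 맵게.py | solution
-- ===== SOURCE A (Python) =====
-- import heapq
--
-- def solution(scoville, K):
--     answer = 0
--     heapq.heapify(scoville)
--     while scoville:
--         minimum1 = heapq.heappop(scoville)
--         if minimum1 >= K:
--             return answer
--         if len(scoville) == 0:
--             return -1
--         minimum2 = heapq.heappop(scoville)
--         heapq.heappush(scoville,minimum1+minimum2*2)
--         answer += 1
-- ===== SOURCE B (Python) =====
-- def solution(scoville, K):
--     # Return-value equivalence only: A mutates scoville via heapify/heappop; B works on a sorted copy.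
--     pool = sorted(scoville)
--     answer = 0
--     while pool:
--         if pool[0] >= K:
--             return answer
--         if len(pool) == 1:
--             return -1
--         new = pool[0] + 2 * pool[1]
--         rest = pool[2:]
--         i = 0
--         while i < len(rest) and rest[i] < new:
--             i += 1
--         rest.insert(i, new)
--         pool = rest
--         answer += 1
-- ===== Notes on version B (the rewrite author's own statement) =====
-- stated objective: alternative
-- what changed: Replaces the binary heap (heapify/heappop/heappush) with a single initial sort followed by head access and ordered linear insertion of each mixed value; return-value equivalence only, since A mutates its argument and B works on a sorted copy.
-- outside the precondition, e.g. on solution([], 5): A returns None, B returns None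
import Mathlib
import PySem

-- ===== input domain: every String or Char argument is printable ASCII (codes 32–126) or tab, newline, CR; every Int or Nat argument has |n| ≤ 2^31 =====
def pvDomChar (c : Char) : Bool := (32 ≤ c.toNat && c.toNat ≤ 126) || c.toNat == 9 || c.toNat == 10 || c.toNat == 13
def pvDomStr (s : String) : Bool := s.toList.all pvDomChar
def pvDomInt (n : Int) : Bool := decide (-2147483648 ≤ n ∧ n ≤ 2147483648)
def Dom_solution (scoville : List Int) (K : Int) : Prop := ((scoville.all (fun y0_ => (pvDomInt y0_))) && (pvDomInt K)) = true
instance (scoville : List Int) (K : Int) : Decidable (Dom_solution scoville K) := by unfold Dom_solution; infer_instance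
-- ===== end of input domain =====

-- B replaces A's binary heap with one initial sort plus ordered linear insertion; equivalence is
-- about the RETURN value only (A mutates scoville in place via heapify/heappop, B sorts a copy).

-- ===== PORT A =====
-- heapq is ported by its exact semantics on Int elements: equal values are indistinguishable, so
-- heappop returns precisely the minimum value and leaves the multiset minus one occurrence of it;
-- the heap's internal layout cannot affect any returned value.
def popMin (l : List Int) : Int × List Int :=
  match PySem.List.min? l (fun x => x) with
  | none => (0, [])          -- heappop on [] raises; unreachable behind A's loop guard
  | some m => (m, l.erase m)

theorem popMin_len (l : List Int) (h : l ≠ []) : (popMin l).2.length + 1 = l.length := by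
  unfold popMin
  cases hm : PySem.List.min? l (fun x => x) with
  | none => exact absurd ((PySem.List.min?_eq_none_iff l (fun x => x)).mp hm) h
  | some m =>
    have hmem := PySem.List.min?_mem hm
    have := List.length_erase_of_mem hmem
    have : l.length ≠ 0 := by simpa using List.length_pos_of_mem hmem |>.ne'
    simp [List.length_erase_of_mem hmem]
    omega

def solutionGo (sc : List Int) (K ans : Int) : Int :=
  if hne : sc = [] then 0    -- Python falls off the while loop (returns None); excluded by Pre_
  else
    let p := popMin sc
    if p.1 ≥ K then ans
    else if h2 : p.2 = [] then -1
    else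
      let q := popMin p.2
      solutionGo ((p.1 + q.1 * 2) :: q.2) K (ans + 1)
termination_by sc.length
decreasing_by
  have h1 := popMin_len sc hne
  have h2' := popMin_len (popMin sc).2 h2
  simp only [List.length_cons]
  omega

def solution (scoville : List Int) (K : Int) : Int :=
  solutionGo scoville K 0

-- ===== PORT B =====
-- the hand-written ordered-insert loop of Source B
def insertSorted (x : Int) : List Int → List Int
  | [] => [x]
  | y :: ys => if y < x then y :: insertSorted x ys else x :: y :: ys

theorem length_insertSorted (x : Int) (l : List Int) :
    (insertSorted x l).length = l.length + 1 := by
  induction l with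
  | nil => rfl
  | cons y ys ih => simp only [insertSorted]; split <;> simp [ih]

def altGo (pool : List Int) (K ans : Int) : Int :=
  match pool with
  | [] => 0                  -- Source B falls off the while loop (returns None); excluded by Pre_
  | [a] => if a ≥ K then ans else -1
  | a :: b :: t => if a ≥ K then ans else altGo (insertSorted (a + 2 * b) t) K (ans + 1)
termination_by pool.length
decreasing_by simp [length_insertSorted]

def solution_alt (scoville : List Int) (K : Int) : Int :=
  altGo (PySem.List.sorted scoville (fun x => x) false) K 0

-- ===== PRECONDITION & SPEC =====
-- Pre_ excludes only the empty list, on which A (and Source B alike) falls off its loop and returns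
-- None instead of an int.
def Pre_solution (scoville : List Int) (K : Int) : Prop := scoville ≠ []
instance (scoville : List Int) (K : Int) : Decidable (Pre_solution scoville K) := by unfold Pre_solution; infer_instance
def pvWitness_solution : List Int × Int := ([1, 2, 9, 3], 7)

def Spec_solution (scoville : List Int) (K : Int) (out : Int) : Prop := out = solution_alt scoville K
instance (scoville : List Int) (K : Int) (out : Int) : Decidable (Spec_solution scoville K out) := by unfold Spec_solution; infer_instance

-- ===== CLAIM (what is proved, stated in full; the proofs are below) =====
def Claim_equal_solution : Prop := ∀ (scoville : List Int) (K : Int), Dom_solution scoville K → Pre_solution scoville K → Spec_solution scoville K (solution scoville K)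

-- ===== LEMMAS AND PROOFS =====

theorem min?_of_perm_sorted (l : List Int) (m : Int) (t : List Int)
    (hp : l.Perm (m :: t)) (hs : (m :: t).Pairwise (· ≤ ·)) :
    PySem.List.min? l (fun x => x) = some m := by
  cases hm : PySem.List.min? l (fun x => x) with
  | none =>
    have : l = [] := (PySem.List.min?_eq_none_iff l (fun x => x)).mp hm
    subst this
    exact absurd hp.symm (by simp)
  | some m0 =>
    have hmem : m0 ∈ l := PySem.List.min?_mem hm
    have hmin := PySem.List.min?_isMin hm
    have hml : m ∈ l := hp.symm.subset (List.mem_cons_self ..)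
    have h1 : m0 ≤ m := by simpa using hmin m hml
    have h2 : m ≤ m0 := by
      have : m0 ∈ m :: t := hp.subset hmem
      rcases List.mem_cons.mp this with h | h
      · omega
      · exact (List.pairwise_cons.mp hs).1 m0 h
    have : m0 = m := le_antisymm h1 h2
    simpa [this] using hm

theorem insertSorted_perm (x : Int) (l : List Int) : (insertSorted x l).Perm (x :: l) := by
  induction l with
  | nil => rfl
  | cons y ys ih =>
    simp only [insertSorted]
    split
    · exact ((ih.cons y).trans (List.Perm.swap x y ys))
    · rfl

theorem insertSorted_pairwise (x : Int) (l : List Int) (h : l.Pairwise (· ≤ ·)) :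
    (insertSorted x l).Pairwise (· ≤ ·) := by
  induction l with
  | nil => simp [insertSorted]
  | cons y ys ih =>
    rcases List.pairwise_cons.mp h with ⟨hy, hys⟩
    simp only [insertSorted]
    split
    · rename_i hyx
      refine List.pairwise_cons.mpr ⟨?_, ih hys⟩
      intro z hz
      rcases List.mem_cons.mp ((insertSorted_perm x ys).subset hz) with h1 | h1
      · subst h1; omega
      · exact hy z h1
    · rename_i hyx
      refine List.pairwise_cons.mpr ⟨?_, h⟩
      intro z hz
      rcases List.mem_cons.mp hz with hz1 | hz1
      · omega
      · have := hy z hz1; omega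

theorem go_eq : ∀ (n : Nat) (l l' : List Int) (K ans : Int),
    l.length = n → l.Perm l' → l'.Pairwise (· ≤ ·) →
    solutionGo l K ans = altGo l' K ans := by
  intro n
  induction n using Nat.strong_induction_on with
  | _ n ih =>
    intro l l' K ans hlen hperm hsort
    match l' with
    | [] =>
      have : l = [] := hperm.eq_nil
      subst this
      rw [solutionGo, altGo]
      simp
    | [m] =>
      have : l = [m] := List.perm_singleton.mp hperm
      subst this
      rw [solutionGo, altGo]
      simp [popMin, PySem.List.min?_id_cons]
    | m :: b :: t2 =>
      have hlne : l ≠ [] := by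
        intro h; subst h; exact absurd hperm.symm (by simp)
      have hmin : PySem.List.min? l (fun x => x) = some m :=
        min?_of_perm_sorted l m (b :: t2) hperm hsort
      have hp1 : popMin l = (m, l.erase m) := by simp [popMin, hmin]
      have hpe : (l.erase m).Perm (b :: t2) := by
        have := hperm.erase m
        simpa [List.erase_cons_head] using this
      have hene : l.erase m ≠ [] := by
        intro h
        have := hpe.length_eq
        simp [h] at this
      have hmin2 : PySem.List.min? (l.erase m) (fun x => x) = some b :=
        min?_of_perm_sorted (l.erase m) b t2 hpe (List.pairwise_cons.mp hsort).2
      have hp2 : popMin (l.erase m) = (b, (l.erase m).erase b) := by simp [popMin, hmin2]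
      rw [solutionGo, altGo]
      simp only [dif_neg hlne, hp1, hp2, dif_neg hene]
      by_cases hK : m ≥ K
      · simp [hK]
      · simp only [hK] at *
        rw [if_neg (by omega), if_neg (by omega)]
        -- recursive case: apply the induction hypothesis at length n - 1
        have hmem : m ∈ l := hperm.symm.subset (List.mem_cons_self ..)
        have hbm : b ∈ l.erase m := hpe.symm.subset (List.mem_cons_self ..)
        have hlen1 : (l.erase m).length + 1 = l.length := by
          simp [List.length_erase_of_mem hmem]
          have := List.length_pos_of_mem hmem
          omega
        have hlen2 : ((l.erase m).erase b).length + 1 = (l.erase m).length := by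
          simp [List.length_erase_of_mem hbm]
          have := List.length_pos_of_mem hbm
          omega
        have hpe2 : ((l.erase m).erase b).Perm t2 := by
          have := hpe.erase b
          simpa [List.erase_cons_head] using this
        have hpermN : ((m + b * 2) :: (l.erase m).erase b).Perm (insertSorted (m + 2 * b) t2) := by
          have h1 : ((m + b * 2) :: (l.erase m).erase b).Perm ((m + 2 * b) :: t2) := by
            have : m + b * 2 = m + 2 * b := by ring
            rw [this]
            exact hpe2.cons _
          exact h1.trans (insertSorted_perm (m + 2 * b) t2).symm
        have hsortN : (insertSorted (m + 2 * b) t2).Pairwise (· ≤ ·) :=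
          insertSorted_pairwise _ _ ((List.pairwise_cons.mp (List.pairwise_cons.mp hsort).2).2)
        exact ih (n - 1) (by omega) _ _ K (ans + 1) (by simp; omega) hpermN hsortN

-- ===== VERDICT (by name: the statement is the Claim_ definition above) =====
theorem solution_spec : Claim_equal_solution := by
  intro sc K _ _
  unfold Spec_solution solution solution_alt
  exact go_eq sc.length sc (PySem.List.sorted sc (fun x => x) false) K 0 rfl
    (PySem.List.sorted_perm sc (fun x => x) false).symm
    (by simpa using PySem.List.sorted_pairwise sc (fun x => x))
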